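-- pv_equiv track=rewrite | github.com/mitsu3291/ML-Bayesian | util.py | return_xyz
-- ===== SOURCE A (Python) =====
-- def return_xyz(data_list):
--     x_list = []
--     y_list = []
--     z_list = []
--     for data in data_list:
--         x_list.append(data[0])
--         y_list.append(data[1])
--         z_list.append(data[2])
--     return_list = [x_list, y_list, z_list]
--
--     return return_list
-- ===== SOURCE B (Python) =====
-- def return_xyz(data_list):
--     # column-major: one full pass per column index, instead of A's single
--     # row-major pass with three appends per row
--     return [[data[i] for data in data_list] for i in range(3)]
-- ===== Notes on version B (the rewrite author's own statement) =====
-- stated objective: alternative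
-- what changed: Row-major single pass with three parallel accumulators is replaced by a column-major build: for each column index 0,1,2 one full pass over data_list collecting that component.
import Mathlib
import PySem

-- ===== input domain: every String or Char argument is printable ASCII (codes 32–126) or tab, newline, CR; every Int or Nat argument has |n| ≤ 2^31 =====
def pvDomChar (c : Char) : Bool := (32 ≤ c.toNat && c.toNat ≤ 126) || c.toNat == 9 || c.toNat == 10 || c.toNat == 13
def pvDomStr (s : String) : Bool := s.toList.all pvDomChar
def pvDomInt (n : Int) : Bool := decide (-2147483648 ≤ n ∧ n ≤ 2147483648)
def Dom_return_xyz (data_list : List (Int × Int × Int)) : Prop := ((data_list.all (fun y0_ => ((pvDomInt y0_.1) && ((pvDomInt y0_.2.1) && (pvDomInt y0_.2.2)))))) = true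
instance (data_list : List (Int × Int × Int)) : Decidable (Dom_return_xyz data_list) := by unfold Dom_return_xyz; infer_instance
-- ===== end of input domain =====

-- ===== PORT A =====
-- A: one row-major pass over data_list, appending each row's components to
-- three accumulator lists x_list, y_list, z_list.
def return_xyz (data_list : List (Int × Int × Int)) : List (List Int) :=
  let st := data_list.foldl
    (fun (acc : List Int × List Int × List Int) data =>
      (acc.1 ++ [data.1], acc.2.1 ++ [data.2.1], acc.2.2 ++ [data.2.2]))
    ([], [], [])
  [st.1, st.2.1, st.2.2]

-- ===== PORT B =====
-- B (column-major): for each i in range(3), one pass over data_list taking data[i].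
def pvColGet (data : Int × Int × Int) (i : Int) : Int :=
  if i = 0 then data.1 else if i = 1 then data.2.1 else data.2.2
def return_xyz_alt (data_list : List (Int × Int × Int)) : List (List Int) :=
  (PySem.List.pyRange 0 3 1).map (fun i => data_list.map (fun data => pvColGet data i))

-- ===== PRECONDITION & SPEC =====
def Spec_return_xyz (data_list : List (Int × Int × Int)) (out : List (List Int)) : Prop := out = return_xyz_alt data_list
instance (data_list : List (Int × Int × Int)) (out : List (List Int)) : Decidable (Spec_return_xyz data_list out) := by unfold Spec_return_xyz; infer_instance

-- ===== CLAIM (what is proved, stated in full; the proofs are below) =====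
def Claim_equal_return_xyz : Prop := ∀ (data_list : List (Int × Int × Int)), Dom_return_xyz data_list → Spec_return_xyz data_list (return_xyz data_list)

-- ===== LEMMAS AND PROOFS =====

-- ===== VERDICT (by name: the statement is the Claim_ definition above) =====
theorem pvFoldl_xyz (l : List (Int × Int × Int)) (a b c : List Int) :
    l.foldl (fun (acc : List Int × List Int × List Int) data =>
      (acc.1 ++ [data.1], acc.2.1 ++ [data.2.1], acc.2.2 ++ [data.2.2])) (a, b, c)
    = (a ++ l.map (·.1), b ++ l.map (·.2.1), c ++ l.map (·.2.2)) := by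
  induction l generalizing a b c with
  | nil => simp
  | cons h t ih => simp [List.foldl, ih]

theorem return_xyz_spec : Claim_equal_return_xyz := by
  intro data_list _
  unfold Spec_return_xyz return_xyz return_xyz_alt
  simp [pvFoldl_xyz, PySem.List.pyRange, List.range_succ, pvColGet]
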